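-- pv_equiv track=rewrite | github.com/benbendaisy/CommunicationCodes | python_module/examples/1278_palindrome_partitioning_III.py | countPalindromeDistance
-- ===== SOURCE A (Python) =====
-- def countPalindromeDistance(s: str):
--     left, right = 0, len(s) - 1
--     cnt = 0
--     while left < right:
--         if s[left] != s[right]:
--             cnt += 1
--         left, right = left + 1, right - 1
--     return cnt
-- ===== SOURCE B (Python) =====
-- def countPalindromeDistance(s: str):
--     return sum(a != b for a, b in zip(s, reversed(s))) // 2
-- ===== Notes on version B (the rewrite author's own statement) =====
-- stated objective: simpler
-- what changed: Replaces the inward two-pointer while-loop over the first half with a one-line count of mismatches between s and its reverse over the whole string, halved: each asymmetric pair is counted at both ends, and the odd middle character matches itself.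
import Mathlib
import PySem

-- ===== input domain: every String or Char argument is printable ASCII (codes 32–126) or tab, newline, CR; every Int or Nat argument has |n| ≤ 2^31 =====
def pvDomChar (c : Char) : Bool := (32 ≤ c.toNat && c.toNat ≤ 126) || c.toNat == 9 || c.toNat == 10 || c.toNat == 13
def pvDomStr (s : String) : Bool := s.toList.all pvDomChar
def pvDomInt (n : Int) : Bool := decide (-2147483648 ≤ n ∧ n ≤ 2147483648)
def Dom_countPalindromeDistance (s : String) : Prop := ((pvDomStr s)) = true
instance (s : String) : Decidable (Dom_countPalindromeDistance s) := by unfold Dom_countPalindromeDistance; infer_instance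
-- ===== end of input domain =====

-- B replaces A's inward two-pointer loop with counting mismatches of s against its reverse, halved (simpler one-liner, same O(n) cost).


-- ===== PORT A =====
-- A's while-loop, state (left, right, cnt)
def pvALoop (l : List Char) (left right cnt : Int) : Int :=
  if left < right then
    pvALoop l (left + 1) (right - 1)
      (if PySem.List.pyGet? l left ≠ PySem.List.pyGet? l right then cnt + 1 else cnt)
  else cnt
termination_by (right - left).toNat
decreasing_by all_goals omega

def countPalindromeDistance (s : String) : Int :=
  pvALoop s.toList 0 ((s.toList.length : Int) - 1) 0

-- ===== PORT B =====
def countPalindromeDistance_alt (s : String) : Int :=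
  PySem.Int.floordiv
    ((s.toList.zip s.toList.reverse).foldl
      (fun acc p => acc + (if p.1 ≠ p.2 then (1 : Int) else 0)) 0) 2

-- ===== PRECONDITION & SPEC =====
def Spec_countPalindromeDistance (s : String) (out : Int) : Prop := out = countPalindromeDistance_alt s
instance (s : String) (out : Int) : Decidable (Spec_countPalindromeDistance s out) := by unfold Spec_countPalindromeDistance; infer_instance

-- ===== CLAIM (what is proved, stated in full; the proofs are below) =====
def Claim_equal_countPalindromeDistance : Prop := ∀ (s : String), Dom_countPalindromeDistance s → Spec_countPalindromeDistance s (countPalindromeDistance s)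

-- ===== LEMMAS AND PROOFS =====

theorem pvALoop_eq (l : List Char) (i j c : Int) :
    pvALoop l i j c =
      if i < j then
        pvALoop l (i + 1) (j - 1)
          (if PySem.List.pyGet? l i ≠ PySem.List.pyGet? l j then c + 1 else c)
      else c := by
  conv_lhs => rw [pvALoop]

-- B's fold counts mismatched pairs
theorem pvFold_eq_countP (xs : List (Char × Char)) (c : Int) :
    xs.foldl (fun acc p => acc + (if p.1 ≠ p.2 then (1 : Int) else 0)) c
      = c + (xs.countP (fun p => p.1 ≠ p.2) : Int) := by
  induction xs generalizing c with
  | nil => simp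
  | cons x xs ih =>
    simp only [List.foldl_cons, List.countP_cons, ih]
    split_ifs <;> push_cast <;> ring_nf <;> simp_all

-- accumulator lemma for A's loop
theorem pvALoop_acc (l : List Char) (i j c : Int) :
    pvALoop l i j c = c + pvALoop l i j 0 := by
  by_cases h : i < j
  · rw [pvALoop_eq l i j c, pvALoop_eq l i j 0, if_pos h, if_pos h]
    rw [pvALoop_acc l (i + 1) (j - 1)
        (if PySem.List.pyGet? l i ≠ PySem.List.pyGet? l j then c + 1 else c),
      pvALoop_acc l (i + 1) (j - 1)
        (if PySem.List.pyGet? l i ≠ PySem.List.pyGet? l j then 0 + 1 else 0)]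
    split_ifs <;> ring
  · rw [pvALoop_eq l i j c, pvALoop_eq l i j 0, if_neg h, if_neg h]; ring
termination_by (j - i).toNat
decreasing_by all_goals omega

-- index shift: position k+1 in a :: (m ++ [b]) is position k in m
theorem pvGet_shift (a b : Char) (m : List Char) (i : Int)
    (h0 : 0 ≤ i) (h1 : i < (m.length : Int)) :
    PySem.List.pyGet? (a :: (m ++ [b])) (i + 1) = PySem.List.pyGet? m i := by
  rw [PySem.List.pyGet?_of_nonneg (a :: (m ++ [b])) (show (0:Int) ≤ i + 1 by omega),
    PySem.List.pyGet?_of_nonneg m h0]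
  have hi : (i + 1).toNat = i.toNat + 1 := by omega
  have hlt : i.toNat < m.length := by omega
  rw [hi, List.getElem?_cons_succ, List.getElem?_append_left hlt]

-- A's loop on a :: (m ++ [b]) with shifted pointers is A's loop on m
theorem pvALoop_shift (a b : Char) (m : List Char) (i j cnt : Int)
    (h0 : 0 ≤ i) (h1 : j < (m.length : Int)) :
    pvALoop (a :: (m ++ [b])) (i + 1) (j + 1) cnt = pvALoop m i j cnt := by
  by_cases h : i < j
  · rw [pvALoop_eq (a :: (m ++ [b])) (i + 1) (j + 1) cnt, pvALoop_eq m i j cnt,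
      if_pos (show i + 1 < j + 1 by omega), if_pos h,
      pvGet_shift a b m i h0 (by omega), pvGet_shift a b m j (by omega) h1]
    have e2 : j + 1 - 1 = (j - 1) + 1 := by ring
    rw [e2]
    exact pvALoop_shift a b m (i + 1) (j - 1) _ (by omega) (by omega)
  · rw [pvALoop_eq (a :: (m ++ [b])) (i + 1) (j + 1) cnt, pvALoop_eq m i j cnt,
      if_neg (show ¬ i + 1 < j + 1 by omega), if_neg h]
termination_by (j - i).toNat
decreasing_by all_goals omega

-- mismatch count of l against its reverse
def pvMism (l : List Char) : Nat := (l.zip l.reverse).countP (fun p => p.1 ≠ p.2)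

theorem pvMism_both (a b : Char) (m : List Char) :
    pvMism (a :: (m ++ [b]))
      = (if a ≠ b then 1 else 0) + pvMism m + (if b ≠ a then 1 else 0) := by
  unfold pvMism
  have hrev : (a :: (m ++ [b])).reverse = b :: (m.reverse ++ [a]) := by
    rw [List.reverse_cons, List.reverse_append]; rfl
  rw [hrev, List.zip_cons_cons, List.zip_append (by simp), List.countP_cons,
    List.countP_append]
  have h1 : List.countP (fun p => decide (p.1 ≠ p.2)) ([b].zip [a])
      = if b ≠ a then 1 else 0 := by
    by_cases hba : b = a <;> simp [hba]
  have h2 : (if decide ((a, b).1 ≠ (a, b).2) = true then 1 else 0)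
      = if a ≠ b then 1 else 0 := by
    by_cases hab : a = b <;> simp [hab]
  rw [h1, h2]
  omega

-- core: the full-string mismatch count is twice A's two-pointer count
theorem pvCore (l : List Char) :
    (pvMism l : Int) = 2 * pvALoop l 0 ((l.length : Int) - 1) 0 := by
  induction l using List.bidirectionalRec with
  | nil => simp [pvMism, pvALoop]
  | singleton a =>
    rw [pvALoop_eq]
    simp [pvMism]
  | cons_append a m b ih =>
    rw [pvMism_both]
    have hlen : (((a :: (m ++ [b])).length : Int)) - 1 = (m.length : Int) + 1 := by
      simp
    rw [hlen, pvALoop_eq (a :: (m ++ [b])) 0 ((m.length : Int) + 1) 0,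
      if_pos (show (0:Int) < (m.length : Int) + 1 by omega)]
    have hga : PySem.List.pyGet? (a :: (m ++ [b])) 0 = some a :=
      PySem.List.pyGet?_zero_cons a (m ++ [b])
    have hgb : PySem.List.pyGet? (a :: (m ++ [b])) ((m.length : Int) + 1) = some b := by
      have e : ((m.length : Int) + 1) = (((a :: m).length : Nat) : Int) := by
        push_cast [List.length_cons]; ring
      rw [e, show a :: (m ++ [b]) = (a :: m) ++ [b] by simp]
      exact PySem.List.pyGet?_append_length (a :: m) [] b
    rw [hga, hgb]
    have hc : (if some a ≠ some b then (0:Int) + 1 else 0) = if a ≠ b then 1 else 0 := by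
      by_cases hab : a = b <;> simp [hab]
    rw [hc]
    have e2 : (m.length : Int) + 1 - 1 = ((m.length : Int) - 1) + 1 := by ring
    rw [e2, pvALoop_shift a b m 0 ((m.length : Int) - 1) _ (by omega) (by omega),
      pvALoop_acc m 0 ((m.length : Int) - 1) (if a ≠ b then 1 else 0)]
    push_cast
    by_cases hab : a = b
    · have h1 : ¬ (a ≠ b) := by simp [hab]
      have h2 : ¬ (b ≠ a) := by simp [hab]
      rw [if_neg h1, if_neg h2]
      linarith [ih]
    · have hba : b ≠ a := fun h => hab h.symm
      rw [if_pos hab, if_pos hba]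
      linarith [ih]

-- ===== VERDICT (by name: the statement is the Claim_ definition above) =====
theorem countPalindromeDistance_spec : Claim_equal_countPalindromeDistance := by
  intro s _
  unfold Spec_countPalindromeDistance countPalindromeDistance countPalindromeDistance_alt
  rw [pvFold_eq_countP]
  have h := pvCore s.toList
  unfold pvMism at h
  rw [zero_add, PySem.Int.floordiv_eq_ediv_of_pos (by omega)]
  omega
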